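-- pv_equiv track=rewrite | github.com/Ghoreish/usaco | beads/beads.py | makebeads
-- ===== SOURCE A (Python) =====
-- def check(l):
--     ml=[]
--     for i in l:
--         if i=="w":
--             ml.append(0)
--     nl=[]
--     while True:
--         nl.append([])
--         for i in ml:
--             nl[-1].append(i)
--         ml[-1]+=1
--         while 2 in ml:
--             if all(ml)==1:
--                 break
--             for i in range(len(ml)):
--                 if ml[i]==2:
--                     ml[i]=0
--                     ml[i-1]+=1
--         if all(ml) == 1:
--             nl.append([])
--             for i in ml:
--                 nl[-1].append(i)
--             break
--     return nl
--
-- def makebeads(x):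
--     if "w" in x:
--         yy=[]
--         h=check(x)
--         for i in h:
--             n=0
--             y=""
--             for j in x:
--                 if j=="w":
--                     if i[n]==0:
--                         y+="b"
--                     else:
--                         y+="r"
--                     n+=1
--                 else:
--                     y+=j
--             yy.append(y)
--     else:
--         yy=[x]
--     return yy
-- ===== SOURCE B (Python) =====
-- def makebeads(x):
--     # Enumerate the 2**k colorings by an integer counter; bit j of m
--     # (most significant first) chooses 'b' (0) or 'r' (1) for the j-th 'w'.
--     k = x.count("w")
--     if k == 0:
--         return [x]
--     res = []
--     for m in range(1 << k):
--         parts = []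
--         shift = k
--         for c in x:
--             if c == "w":
--                 shift -= 1
--                 parts.append("r" if (m >> shift) & 1 else "b")
--             else:
--                 parts.append(c)
--         res.append("".join(parts))
--     return res
-- ===== Notes on version B (the rewrite author's own statement) =====
-- stated objective: alternative
-- what changed: Replaces A's list-of-digits counter with explicit carry propagation (rescanning the list for 2s and copying it each round) by a single integer counter m over range(1<<k) whose bits are read directly while building each output string.
import Mathlib
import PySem

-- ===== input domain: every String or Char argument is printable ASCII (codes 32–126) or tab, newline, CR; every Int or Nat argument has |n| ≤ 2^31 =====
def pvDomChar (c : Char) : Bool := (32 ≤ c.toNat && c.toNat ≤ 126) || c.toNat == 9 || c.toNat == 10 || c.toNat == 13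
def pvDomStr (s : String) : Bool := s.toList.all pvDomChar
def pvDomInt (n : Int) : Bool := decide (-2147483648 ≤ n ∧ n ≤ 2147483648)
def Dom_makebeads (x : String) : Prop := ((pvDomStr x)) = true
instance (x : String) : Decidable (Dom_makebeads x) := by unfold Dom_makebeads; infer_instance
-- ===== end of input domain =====

-- B replaces A's hand-rolled list-of-digits counter with carry rescans by a single integer
-- counter whose bits are read while building each string (objective: alternative algorithm).

-- ===== PORT A =====
-- ml[-1] += 1  (total form of Python's negative-index assignment; the index is in range whenever A runs it)
def pvIncLast (ml : List Nat) : List Nat :=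
  PySem.List.pySetD ml (-1) (PySem.List.pyGetD ml (-1) 0 + 1)

-- one execution of 'for i in range(len(ml)): if ml[i]==2: ml[i]=0; ml[i-1]+=1'
def pvCarryPass (ml : List Nat) : List Nat :=
  (PySem.List.pyRange 0 (PySem.List.len ml) 1).foldl
    (fun acc i =>
      if PySem.List.pyGetD acc i 0 = 2 then
        let acc1 := PySem.List.pySetD acc i 0
        PySem.List.pySetD acc1 (i - 1) (PySem.List.pyGetD acc1 (i - 1) 0 + 1)
      else acc) ml

-- 'while 2 in ml: if all(ml)==1: break; <pass>' — fuel only totalizes the loop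
def pvCarryLoop : Nat → List Nat → List Nat
  | 0, ml => ml
  | f + 1, ml =>
    if ml.contains 2 then
      if ml.all (· != 0) then ml else pvCarryLoop f (pvCarryPass ml)
    else ml

-- the 'while True' loop of check; fuel 2^k totalizes it (the Python loop runs 2^k-1 rounds)
def pvOuterLoop : Nat → List Nat → List (List Nat) → List (List Nat)
  | 0, _, nl => nl
  | f + 1, ml, nl =>
    let nl' := nl ++ [ml]
    let ml' := pvCarryLoop (ml.length + 1) (pvIncLast ml)
    if ml'.all (· != 0) then nl' ++ [ml'] else pvOuterLoop f ml' nl'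

def pvCheck (l : List Char) : List (List Nat) :=
  let ml := l.foldl (fun ml i => if i = 'w' then ml ++ [0] else ml) []
  pvOuterLoop (2 ^ ml.length) ml []

-- inner 'for j in x' of makebeads; y += c is accumulated as List Char and packed by String.ofList (exact);
-- i[n] is total pyGetD (n < len(i) whenever A reads it)
def pvRenderA (cs : List Char) (i : List Nat) : String :=
  String.ofList ((cs.foldl
    (fun (p : Nat × List Char) j =>
      if j = 'w' then
        (p.1 + 1, p.2 ++ [if PySem.List.pyGetD i (p.1 : Int) 0 = 0 then 'b' else 'r'])
      else (p.1, p.2 ++ [j])) (0, [])).2)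

def makebeads (x : String) : List String :=
  let cs := x.toList
  if cs.contains 'w' then      -- '"w" in x' (single-character substring test, exact)
    (pvCheck cs).foldl (fun yy i => yy ++ [pvRenderA cs i]) []
  else [x]

-- ===== PORT B =====
-- inner 'for c in x' of B; shift starts at k = total 'w' count and is decremented once per 'w',
-- so it never goes below 0 and Nat subtraction is exact
def pvBuildB (cs : List Char) (k m : Nat) : String :=
  String.ofList ((cs.foldl
    (fun (p : Nat × List Char) c =>
      if c = 'w' then
        (p.1 - 1, p.2 ++ [if (m >>> (p.1 - 1)) &&& 1 = 1 then 'r' else 'b'])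
      else (p.1, p.2 ++ [c])) (k, [])).2)

def makebeads_alt (x : String) : List String :=
  let cs := x.toList
  let k := cs.count 'w'        -- x.count('w') (single character, exact)
  if k = 0 then [x]
  else (List.range (1 <<< k)).foldl (fun res m => res ++ [pvBuildB cs k m]) []
        -- range(1 << k): nonnegative, ported as List.range over Nat

-- ===== PRECONDITION & SPEC =====
def Spec_makebeads (x : String) (out : List String) : Prop := out = makebeads_alt x
instance (x : String) (out : List String) : Decidable (Spec_makebeads x out) := by unfold Spec_makebeads; infer_instance

-- ===== CLAIM (what is proved, stated in full; the proofs are below) =====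
def Claim_equal_makebeads : Prop := ∀ (x : String), Dom_makebeads x → Spec_makebeads x (makebeads x)

-- ===== LEMMAS AND PROOFS =====

-- big-endian binary digits of m on k positions
def pvBits : Nat → Nat → List Nat
  | 0, _ => []
  | k + 1, m => pvBits k (m / 2) ++ [m % 2]

theorem pvBits_length (k m : Nat) : (pvBits k m).length = k := by
  induction k generalizing m with
  | zero => rfl
  | succ k ih => simp [pvBits, ih]

theorem pvBits_lt_two (k m : Nat) : ∀ d ∈ pvBits k m, d < 2 := by
  induction k generalizing m with
  | zero => simp [pvBits]
  | succ k ih =>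
    intro d hd
    simp only [pvBits, List.mem_append, List.mem_singleton] at hd
    rcases hd with h | h
    · exact ih _ _ h
    · omega

theorem pvBits_zero (k : Nat) : pvBits k 0 = List.replicate k 0 := by
  induction k with
  | zero => rfl
  | succ k ih => simp [pvBits, ih, List.replicate_succ']

theorem pvBits_ones (k : Nat) : pvBits k (2 ^ k - 1) = List.replicate k 1 := by
  induction k with
  | zero => rfl
  | succ k ih =>
    have h1 : (2 ^ (k + 1) - 1) / 2 = 2 ^ k - 1 := by
      have : 2 ^ (k + 1) = 2 * 2 ^ k := by ring
      omega
    have h2 : (2 ^ (k + 1) - 1) % 2 = 1 := by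
      have : 2 ^ (k + 1) = 2 * 2 ^ k := by ring
      have : 1 ≤ 2 ^ k := Nat.one_le_two_pow
      omega
    simp [pvBits, h1, h2, ih, List.replicate_succ']

def pvVal (ds : List Nat) : Nat := ds.foldl (fun a d => 2 * a + d) 0

theorem pvVal_bits (k m : Nat) (h : m < 2 ^ k) : pvVal (pvBits k m) = m := by
  induction k generalizing m with
  | zero => simp [pvBits, pvVal]; omega
  | succ k ih =>
    have h2 : 2 ^ (k+1) = 2 * 2 ^ k := by ring
    have hm2 : m / 2 < 2 ^ k := by omega
    have h3 : pvVal (pvBits k (m/2)) = m / 2 := ih _ hm2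
    simp only [pvBits, pvVal, List.foldl_append, List.foldl_cons, List.foldl_nil]
    simp only [pvVal] at h3
    rw [h3]; omega

theorem pvBits_getD (k m n : Nat) (h : n < k) :
    (pvBits k m).getD n 0 = m / 2 ^ (k - 1 - n) % 2 := by
  induction k generalizing m n with
  | zero => omega
  | succ k ih =>
    by_cases hn : n < k
    · have h4 := ih (m/2) n hn
      simp only [pvBits]
      rw [List.getD_append _ _ _ _ (by rw [pvBits_length]; exact hn), h4,
        Nat.div_div_eq_div_mul]
      have h5 : 2 * 2 ^ (k - 1 - n) = 2 ^ (k + 1 - 1 - n) := by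
        rw [← pow_succ']; congr 1; omega
      rw [h5]
    · have hnk : n = k := by omega
      subst hnk
      simp only [pvBits]
      rw [List.getD_append_right _ _ _ _ (by rw [pvBits_length])]
      simp [pvBits_length]

-- A counter below 2^k - 1 is not all-ones; the all-ones counter is.
theorem pvAll_ones (k : Nat) :
    (pvBits k (2 ^ k - 1)).all (· != 0) = true := by
  rw [pvBits_ones]
  simp

theorem pvNot_all_ones (k v : Nat) (hv : v < 2 ^ k - 1) :
    (pvBits k v).all (· != 0) = false := by
  by_contra hcon
  have hall : (pvBits k v).all (· != 0) = true := by
    cases h : (pvBits k v).all (· != 0) with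
    | false => exact absurd h hcon
    | true => rfl
  have hrep : pvBits k v = List.replicate k 1 := by
    rw [List.eq_replicate_iff]
    refine ⟨pvBits_length k v, ?_⟩
    intro b hb
    have h1 := pvBits_lt_two k v b hb
    have h2 := (List.all_eq_true.mp hall) b hb
    simp only [bne_iff_ne, ne_eq] at h2
    omega
  have hv1 : v < 2 ^ k := by omega
  have h6 := pvVal_bits k v hv1
  rw [hrep, ← pvBits_ones, pvVal_bits k _ (by have : 1 ≤ 2^k := Nat.one_le_two_pow; omega)] at h6
  omega

theorem pvIncLast_concat (ys : List Nat) (d : Nat) :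
    pvIncLast (ys ++ [d]) = ys ++ [d + 1] := by
  unfold pvIncLast
  rw [PySem.List.pyGetD_neg_one_append_singleton]
  simp [PySem.List.pySetD, PySem.List.pySet?, PySem.List.pyIdx?]

theorem pvNoTwo_bits (k m : Nat) : 2 ∉ pvBits k m := by
  intro h
  have := pvBits_lt_two k m 2 h
  omega

theorem pvCarryLoop_no2 (f : Nat) (ml : List Nat) (h : 2 ∉ ml) :
    pvCarryLoop f ml = ml := by
  cases f with
  | zero => rfl
  | succ f =>
    simp [pvCarryLoop, h]

theorem pvFoldl_fixed {α β : Type} (f : α → β → α) (a : α) (l : List β)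
    (h : ∀ i ∈ l, f a i = a) : l.foldl f a = a := by
  induction l with
  | nil => rfl
  | cons x t ih =>
    rw [List.foldl_cons, h x (by simp)]
    exact ih (fun i hi => h i (by simp [hi]))

theorem pvGetD_ne_two {bs : List Nat} (hb : ∀ b ∈ bs, b ≠ 2) (j : Nat) : bs.getD j 0 ≠ 2 := by
  by_cases hj : j < bs.length
  · rw [List.getD_eq_getElem _ _ hj]
    exact hb _ (List.getElem_mem hj)
  · rw [List.getD_eq_default _ _ (by omega)]
    omega

theorem pvCarryPass_single (as bs : List Nat) (d : Nat)
    (ha : ∀ a ∈ as, a ≠ 2) (hd : d ≠ 2) (hb : ∀ b ∈ bs, b ≠ 2) :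
    pvCarryPass (as ++ d :: 2 :: bs) = as ++ (d + 1) :: 0 :: bs := by
  have hlen : (as ++ d :: 2 :: bs).length = (as.length + 1) + 1 + bs.length := by
    simp; omega
  unfold pvCarryPass
  rw [PySem.List.len_eq, hlen]
  rw [show ((((as.length + 1) + 1 + bs.length : Nat)) : Int) = (((as.length + 1) + 1 + bs.length : Nat) : Int) from rfl]
  rw [PySem.List.pyRange_zero_nat, List.foldl_map]
  rw [show (as.length + 1) + 1 + bs.length = (as.length + 1) + (1 + bs.length) by omega]
  rw [List.range_add, List.foldl_append]
  -- phase 1: indices < as.length + 1 are fixed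
  have hfix1 : (List.range (as.length + 1)).foldl
      (fun acc (k : Nat) =>
        if PySem.List.pyGetD acc (k : Int) 0 = 2 then
          let acc1 := PySem.List.pySetD acc (k : Int) 0
          PySem.List.pySetD acc1 ((k : Int) - 1) (PySem.List.pyGetD acc1 ((k : Int) - 1) 0 + 1)
        else acc) (as ++ d :: 2 :: bs) = as ++ d :: 2 :: bs := by
    apply pvFoldl_fixed
    intro i hi
    simp only [List.mem_range] at hi
    rw [if_neg]
    rw [PySem.List.pyGetD_natCast]
    by_cases hia : i < as.length
    · rw [List.getD_append _ _ _ _ hia]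
      exact pvGetD_ne_two ha i
    · have : i = as.length := by omega
      subst this
      rw [List.getD_append_right _ _ _ _ (le_refl _)]
      simpa using hd
  rw [hfix1]
  -- phase 2: the head index as.length+1 is the active step
  rw [show 1 + bs.length = bs.length + 1 by omega, List.range_succ_eq_map,
    List.map_cons, List.foldl_cons, List.map_map]
  have hget : PySem.List.pyGetD (as ++ d :: 2 :: bs) ((as.length + 1 + 0 : Nat) : Int) 0 = 2 := by
    rw [PySem.List.pyGetD_natCast, List.getD_append_right _ _ _ _ (by omega)]
    simp
  rw [if_pos hget]
  have hset1 : PySem.List.pySetD (as ++ d :: 2 :: bs) ((as.length + 1 + 0 : Nat) : Int) 0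
      = as ++ d :: 0 :: bs := by
    rw [PySem.List.pySetD_natCast, List.set_append, if_neg (by omega)]
    simp
  have hcast : ((as.length + 1 + 0 : Nat) : Int) - 1 = ((as.length : Nat) : Int) := by push_cast; ring
  simp only [hset1, hcast]
  have hget2 : PySem.List.pyGetD (as ++ d :: 0 :: bs) ((as.length : Nat) : Int) 0 = d := by
    rw [PySem.List.pyGetD_natCast, List.getD_append_right _ _ _ _ (le_refl _)]
    simp
  rw [hget2]
  have hset2 : PySem.List.pySetD (as ++ d :: 0 :: bs) ((as.length : Nat) : Int) (d + 1)
      = as ++ (d + 1) :: 0 :: bs := by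
    rw [PySem.List.pySetD_natCast, List.set_append, if_neg (by omega)]
    simp
  rw [hset2]
  -- phase 3: the remaining indices are fixed
  apply pvFoldl_fixed
  intro i hi
  simp only [List.mem_map, List.mem_range] at hi
  obtain ⟨x, hx, rfl⟩ := hi
  simp only [Function.comp_apply, Nat.succ_eq_add_one]
  rw [if_neg]
  rw [PySem.List.pyGetD_natCast, List.getD_append_right _ _ _ _ (by omega)]
  have h5 : as.length + 1 + (x + 1) - as.length = 2 + x := by omega
  rw [h5]
  rw [show 2 + x = (x + 1) + 1 by omega, List.getD_cons_succ, List.getD_cons_succ]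
  exact pvGetD_ne_two hb x

theorem pvCarryFix (j : Nat) : ∀ (f r : Nat) (ds : List Nat), j < f → (∀ d ∈ ds, d < 2) →
    pvCarryLoop f (ds ++ 0 :: (List.replicate j 1 ++ 2 :: List.replicate r 0))
      = ds ++ 1 :: List.replicate (j + 1 + r) 0 := by
  induction j with
  | zero =>
    intro f r ds hf hds
    obtain ⟨f', rfl⟩ : ∃ f', f = f' + 1 := ⟨f - 1, by omega⟩
    rw [pvCarryLoop]
    rw [if_pos (by simp)]
    rw [if_neg (by simp)]
    have hpass : pvCarryPass (ds ++ 0 :: (List.replicate 0 1 ++ 2 :: List.replicate r 0))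
        = ds ++ 1 :: List.replicate (r + 1) 0 := by
      simpa [List.replicate_succ] using
        pvCarryPass_single ds (List.replicate r 0) 0
          (fun a ha => by have := hds a ha; omega) (by omega)
          (fun b hbm => by simp at hbm; omega)
    rw [hpass]
    rw [show (0 : Nat) + 1 + r = r + 1 by omega]
    apply pvCarryLoop_no2
    intro hmem
    rcases List.mem_append.mp hmem with h | h
    · have := hds 2 h; omega
    · simp at h
  | succ j ih =>
    intro f r ds hf hds
    obtain ⟨f', rfl⟩ : ∃ f', f = f' + 1 := ⟨f - 1, by omega⟩
    rw [pvCarryLoop]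
    rw [if_pos (by simp)]
    rw [if_neg (by simp)]
    have hpass : pvCarryPass (ds ++ 0 :: (List.replicate (j+1) 1 ++ 2 :: List.replicate r 0))
        = (ds ++ 0 :: List.replicate j 1) ++ 2 :: 0 :: List.replicate r 0 := by
      have h9 := pvCarryPass_single (ds ++ 0 :: List.replicate j 1) (List.replicate r 0) 1
        (by intro a ha; simp at ha
            rcases ha with h | h | h
            · have := hds a h; omega
            · omega
            · omega)
        (by omega)
        (by intro b hbm; simp at hbm; omega)
      simpa [List.replicate_succ', List.append_assoc] using h9
    rw [hpass]
    have heq : (ds ++ 0 :: List.replicate j 1) ++ 2 :: 0 :: List.replicate r 0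
        = ds ++ 0 :: (List.replicate j 1 ++ 2 :: List.replicate (r+1) 0) := by
      simp [List.replicate_succ, List.append_assoc]
    rw [heq]
    rw [show j + 1 + 1 + r = j + 1 + (r + 1) by omega]
    exact ih f' (r+1) ds (by omega) hds


theorem pvTrailing : ∀ (k m : Nat), m % 2 = 1 → m < 2 ^ k - 1 →
    ∃ (ds : List Nat) (j : Nat), (∀ d ∈ ds, d < 2) ∧
      pvBits k m = ds ++ 0 :: List.replicate (j + 1) 1 ∧
      pvBits k (m + 1) = ds ++ 1 :: List.replicate (j + 1) 0 := by
  intro k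
  induction k with
  | zero => intro m _ hm; simp at hm
  | succ k ih =>
    intro m hm1 hm
    have h2 : 2 ^ (k + 1) = 2 * 2 ^ k := by ring
    have hbm : pvBits (k + 1) m = pvBits k (m / 2) ++ [1] := by
      simp [pvBits, hm1]
    have hdiv : (m + 1) / 2 = m / 2 + 1 := by omega
    have hmod : (m + 1) % 2 = 0 := by omega
    have hbm1 : pvBits (k + 1) (m + 1) = pvBits k (m / 2 + 1) ++ [0] := by
      simp [pvBits, hdiv, hmod]
    by_cases hq : m / 2 % 2 = 0
    · -- the bit above the last is already 0
      obtain ⟨k', rfl⟩ : ∃ k', k = k' + 1 := by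
        cases k with
        | zero => omega
        | succ k' => exact ⟨k', rfl⟩
      refine ⟨pvBits k' (m / 2 / 2), 0, fun d hd => pvBits_lt_two _ _ d hd, ?_, ?_⟩
      · rw [hbm]
        have : pvBits (k' + 1) (m / 2) = pvBits k' (m / 2 / 2) ++ [0] := by
          simp [pvBits, hq]
        rw [this]
        simp
      · rw [hbm1]
        have hd2 : (m / 2 + 1) / 2 = m / 2 / 2 := by omega
        have hm2 : (m / 2 + 1) % 2 = 1 := by omega
        have : pvBits (k' + 1) (m / 2 + 1) = pvBits k' (m / 2 / 2) ++ [1] := by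
          simp [pvBits, hd2, hm2]
        rw [this]
        simp
    · -- the bit above the last is 1: recurse
      have hq1 : m / 2 % 2 = 1 := by omega
      have hqlt : m / 2 < 2 ^ k - 1 := by
        have : 1 ≤ 2 ^ k := Nat.one_le_two_pow
        omega
      obtain ⟨ds, j, hds, he1, he2⟩ := ih (m / 2) hq1 hqlt
      refine ⟨ds, j + 1, hds, ?_, ?_⟩
      · rw [hbm, he1]
        simp [List.replicate_succ' (n := j + 1), List.append_assoc]
      · rw [hbm1, he2]
        simp [List.replicate_succ' (n := j + 1), List.append_assoc]

theorem pvStep_succ (k m : Nat) (hk : 1 ≤ k) (hm : m < 2 ^ k - 1) :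
    pvCarryLoop (k + 1) (pvIncLast (pvBits k m)) = pvBits k (m + 1) := by
  by_cases hm2 : m % 2 = 0
  · obtain ⟨k', rfl⟩ : ∃ k', k = k' + 1 := ⟨k - 1, by omega⟩
    have hb : pvBits (k' + 1) m = pvBits k' (m / 2) ++ [0] := by simp [pvBits, hm2]
    have hdiv : (m + 1) / 2 = m / 2 := by omega
    have hmod : (m + 1) % 2 = 1 := by omega
    have hb1 : pvBits (k' + 1) (m + 1) = pvBits k' (m / 2) ++ [1] := by
      simp [pvBits, hdiv, hmod]
    rw [hb, pvIncLast_concat, ← hb1]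
    exact pvCarryLoop_no2 _ _ (pvNoTwo_bits _ _)
  · have hm1 : m % 2 = 1 := by omega
    obtain ⟨ds, j, hds, he1, he2⟩ := pvTrailing k m hm1 hm
    have hlen : ds.length + 1 + (j + 1) = k := by
      have := pvBits_length k m
      rw [he1] at this
      simp at this
      omega
    have hsplit : ds ++ 0 :: List.replicate (j + 1) 1
        = (ds ++ 0 :: List.replicate j 1) ++ [1] := by
      simp [List.replicate_succ' (n := j), List.append_assoc]
    rw [he1, hsplit, pvIncLast_concat]
    have hshape : (ds ++ 0 :: List.replicate j 1) ++ [1 + 1]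
        = ds ++ 0 :: (List.replicate j 1 ++ 2 :: List.replicate 0 0) := by
      simp [List.append_assoc]
    rw [hshape, pvCarryFix j (k + 1) 0 ds (by omega) hds, he2]

theorem pvOuter (k : Nat) (hk : 1 ≤ k) : ∀ (t f m : Nat) (nl : List (List Nat)),
    1 ≤ t → t + 1 ≤ f → m + t = 2 ^ k - 1 →
    pvOuterLoop f (pvBits k m) nl = nl ++ (List.range' m (t + 1)).map (pvBits k) := by
  intro t
  induction t with
  | zero => omega
  | succ t ih =>
    intro f m nl h1 hf hm
    obtain ⟨f', rfl⟩ : ∃ f', f = f' + 1 := ⟨f - 1, by omega⟩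
    have hmlt : m < 2 ^ k - 1 := by omega
    have hml' : pvCarryLoop ((pvBits k m).length + 1) (pvIncLast (pvBits k m))
        = pvBits k (m + 1) := by
      rw [pvBits_length]
      exact pvStep_succ k m hk hmlt
    simp only [pvOuterLoop, hml']
    by_cases ht : t = 0
    · subst ht
      have hm1 : m + 1 = 2 ^ k - 1 := by omega
      rw [if_pos (by rw [hm1]; exact pvAll_ones k)]
      simp [List.range'_succ]
    · rw [if_neg (by rw [pvNot_all_ones k (m + 1) (by omega)]; simp)]
      rw [ih f' (m + 1) (nl ++ [pvBits k m]) (by omega) (by omega) (by omega)]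
      simp [List.range'_succ]

theorem pvCheck_eq (cs : List Char) (k : Nat) (hk : cs.count 'w' = k) (h1 : 1 ≤ k) :
    pvCheck cs = (List.range (2 ^ k)).map (pvBits k) := by
  unfold pvCheck
  have hinit : cs.foldl (fun ml i => if i = 'w' then ml ++ [0] else ml) ([] : List Nat)
      = pvBits k 0 := by
    rw [PySem.List.foldl_append_ite (fun i => i = 'w') (fun _ => (0 : Nat)) cs []]
    rw [pvBits_zero]
    simp only [List.nil_append]
    rw [List.map_const']
    congr 1
    rw [← hk, ← List.countP_eq_length_filter]
    refine List.countP_congr ?_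
    intro x _
    simp
  simp only [hinit, pvBits_length]
  have h2k : 1 ≤ 2 ^ k - 1 := by
    have : 2 ≤ 2 ^ k := by
      calc 2 = 2 ^ 1 := rfl
      _ ≤ 2 ^ k := Nat.pow_le_pow_right (by omega) h1
    omega
  rw [pvOuter k h1 (2 ^ k - 1) (2 ^ k) 0 [] h2k (by omega) (by omega)]
  rw [show 2 ^ k - 1 + 1 = 2 ^ k by omega]
  rw [List.range_eq_range']
  simp

theorem pvWalk (k m : Nat) : ∀ (cs : List Char) (n : Nat) (acc : List Char),
    n + cs.count 'w' ≤ k →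
    (cs.foldl
      (fun (p : Nat × List Char) j =>
        if j = 'w' then
          (p.1 + 1, p.2 ++ [if PySem.List.pyGetD (pvBits k m) (p.1 : Int) 0 = 0 then 'b' else 'r'])
        else (p.1, p.2 ++ [j])) (n, acc)).2
    = (cs.foldl
      (fun (p : Nat × List Char) c =>
        if c = 'w' then
          (p.1 - 1, p.2 ++ [if (m >>> (p.1 - 1)) &&& 1 = 1 then 'r' else 'b'])
        else (p.1, p.2 ++ [c])) (k - n, acc)).2 := by
  intro cs
  induction cs with
  | nil => intro n acc _; simp
  | cons c t ih =>
    intro n acc hcount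
    by_cases hc : c = 'w'
    · subst hc
      have hcnt : ('w' :: t).count 'w' = t.count 'w' + 1 := by simp
      have hnk : n < k := by rw [hcnt] at hcount; omega
      simp only [List.foldl_cons, reduceIte]
      have hdigA : PySem.List.pyGetD (pvBits k m) ((n : Nat) : Int) 0
          = m / 2 ^ (k - 1 - n) % 2 := by
        rw [PySem.List.pyGetD_natCast]
        exact pvBits_getD k m n hnk
      have hdigB : (m >>> (k - n - 1)) &&& 1 = m / 2 ^ (k - 1 - n) % 2 := by
        rw [Nat.and_one_is_mod, Nat.shiftRight_eq_div_pow,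
          show k - n - 1 = k - 1 - n by omega]
      have hch : (if PySem.List.pyGetD (pvBits k m) ((n : Nat) : Int) 0 = 0 then 'b' else 'r')
          = (if (m >>> (k - n - 1)) &&& 1 = 1 then 'r' else 'b') := by
        rw [hdigA, hdigB]
        rcases Nat.mod_two_eq_zero_or_one (m / 2 ^ (k - 1 - n)) with h | h <;> simp [h]
      rw [hch]
      have := ih (n + 1) (acc ++ [if (m >>> (k - n - 1)) &&& 1 = 1 then 'r' else 'b'])
        (by rw [hcnt] at hcount; omega)
      rw [this, show k - (n + 1) = k - n - 1 by omega]
    · have hcnt : (c :: t).count 'w' = t.count 'w' := by simp [hc]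
      simp only [List.foldl_cons, if_neg hc]
      exact ih n (acc ++ [c]) (by rw [hcnt] at hcount; omega)

theorem pvRender_eq (cs : List Char) (k m : Nat) (hk : cs.count 'w' = k) :
    pvRenderA cs (pvBits k m) = pvBuildB cs k m := by
  unfold pvRenderA pvBuildB
  have := pvWalk k m cs 0 [] (by omega)
  simp only [Nat.sub_zero] at this
  rw [this]

-- ===== VERDICT (by name: the statement is the Claim_ definition above) =====
theorem makebeads_spec : Claim_equal_makebeads := by
  intro x _
  unfold Spec_makebeads makebeads makebeads_alt
  by_cases hw : 'w' ∈ x.toList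
  · have hcont : x.toList.contains 'w' = true := by simpa using hw
    have hk1 : 1 ≤ x.toList.count 'w' := List.count_pos_iff.mpr hw
    have hk0 : ¬ (x.toList.count 'w' = 0) := by omega
    simp only [hcont, if_true, hk0, if_false]
    rw [pvCheck_eq x.toList (x.toList.count 'w') rfl hk1]
    rw [PySem.List.foldl_append_singleton_eq_map, PySem.List.foldl_append_singleton_eq_map]
    rw [Nat.one_shiftLeft, List.map_map]
    refine List.map_congr_left ?_
    intro m _
    exact pvRender_eq x.toList _ m rfl
  · have hk0 : x.toList.count 'w' = 0 := List.count_eq_zero.mpr hw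
    simp [hk0]
    intro h
    exact absurd h hw
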